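-- pv_equiv track=rewrite | github.com/MoBensaleh/CMPT141-Introduction-to-Computer-Science | a9q1.py | autumn
-- ===== SOURCE A (Python) =====
-- LIST_OF_FRUITS = ['F', 'W', 'G', 'J', 'M']
--
-- def autumn(garden, total_fruits):
--     """
--     Simulate harvesting in the Fall.
--
--     :param garden: matrix with fruits (list of lists of strings)
--     :param total_fruits: list of counts of harvest from previous years (list of int)
--     :return: list of int, list of int
--     """
--     # initiate list with harvest equal to zero
--     # to count current year's harvest
--     year_harvest = [0, 0, 0, 0, 0]
--     # for each cell in garden
--     for i in range(len(garden)):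
--         for j in range(len(garden[i])):
--             # if there is fruit in the cell
--             if garden[i][j] != '-':
--                 # determine its abbreviation index from constant LIST_OF_FRUITS
--                 index = LIST_OF_FRUITS.index(garden[i][j])
--                 # add 1 to the value with index 'index' in year harvest and total harvest lists
--                 year_harvest[index] += 1
--                 total_fruits[index] += 1
--     return total_fruits, year_harvest
-- ===== SOURCE B (Python) =====
-- LIST_OF_FRUITS = ['F', 'W', 'G', 'J', 'M']
--
--
-- def autumn(garden, total_fruits):
--     # Counting pass instead of per-cell bumping: flatten the grid, count
--     # each known fruit symbol directly with list.count (that list IS the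
--     # year's harvest), then add the nonzero tallies into total_fruits
--     # in place.
--     cells = [c for row in garden for c in row]
--     year_harvest = [cells.count(f) for f in LIST_OF_FRUITS]
--     for i, y in enumerate(year_harvest):
--         if y:
--             total_fruits[i] += y
--     return total_fruits, year_harvest
-- ===== Notes on version B (the rewrite author's own statement) =====
-- stated objective: idiomatic
-- what changed: B flattens the grid and computes year_harvest directly as [cells.count(f) for f in LIST_OF_FRUITS] (one count per fruit symbol), then adds the nonzero tallies into total_fruits in a single enumerate loop, instead of A's per-cell .index lookup with per-cell increments into both lists.
import Mathlib
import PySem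

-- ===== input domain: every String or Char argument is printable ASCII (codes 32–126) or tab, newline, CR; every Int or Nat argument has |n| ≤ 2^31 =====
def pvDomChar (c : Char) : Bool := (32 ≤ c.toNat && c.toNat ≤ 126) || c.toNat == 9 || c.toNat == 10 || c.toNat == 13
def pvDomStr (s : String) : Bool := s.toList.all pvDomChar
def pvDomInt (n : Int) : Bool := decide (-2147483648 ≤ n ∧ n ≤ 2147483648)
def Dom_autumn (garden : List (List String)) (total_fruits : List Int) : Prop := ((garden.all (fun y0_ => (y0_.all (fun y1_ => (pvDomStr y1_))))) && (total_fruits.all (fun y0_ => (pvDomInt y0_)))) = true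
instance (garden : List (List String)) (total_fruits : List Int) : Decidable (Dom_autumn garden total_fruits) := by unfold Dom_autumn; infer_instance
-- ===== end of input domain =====

-- B replaces A's per-cell .index lookup and per-cell increments by flattening the
-- grid, counting each fruit symbol directly (that list is year_harvest) and adding
-- the nonzero tallies into total_fruits once (objective: idiomatic). Both A and B
-- mutate total_fruits in place in Python; the equivalence proved is about the
-- returned pair.

def LIST_OF_FRUITS : List String := ["F", "W", "G", "J", "M"]

-- `l[i] += k` on a Python list (index in range under Pre_; out of range = IndexError, excluded)
def addAt (l : List Int) (i : Nat) (k : Int) : List Int := l.set i (l.getD i 0 + k)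

-- ===== PORT A =====
-- state = (total_fruits, year_harvest); one cell of A's inner loop body
def stepA (st : List Int × List Int) (c : String) : List Int × List Int :=
  if c ≠ "-" then
    match PySem.List.index? LIST_OF_FRUITS c with
    | some idx => (addAt st.1 idx 1, addAt st.2 idx 1)
    | none => st   -- ValueError in Python (excluded by Pre_autumn)
  else st

def autumn (garden : List (List String)) (total_fruits : List Int) : List Int × List Int :=
  garden.foldl (fun st row => row.foldl stepA st) (total_fruits, [0, 0, 0, 0, 0])

-- ===== PORT B =====
def autumn_alt (garden : List (List String)) (total_fruits : List Int) : List Int × List Int :=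
  -- cells = [c for row in garden for c in row]
  let cells := garden.flatMap (fun row => row)
  -- year_harvest = [cells.count(f) for f in LIST_OF_FRUITS]
  let year_harvest := LIST_OF_FRUITS.map (fun f => (PySem.List.count cells f : Int))
  -- for i, y in enumerate(year_harvest): if y: total_fruits[i] += y
  let total := (PySem.List.enumerate year_harvest 0).foldl
      (fun t p => if p.2 ≠ 0 then addAt t p.1.toNat p.2 else t) total_fruits
  (total, year_harvest)

-- ===== PRECONDITION & SPEC =====
-- Pre_ excludes exactly the inputs on which Python A raises: a cell that is neither '-'
-- nor a known fruit (ValueError from .index) or a known fruit whose index is out of range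
-- for total_fruits (IndexError).
def Pre_autumn (garden : List (List String)) (total_fruits : List Int) : Prop :=
  ∀ row ∈ garden, ∀ c ∈ row,
    c = "-" ∨ (c = "F" ∧ 1 ≤ total_fruits.length) ∨ (c = "W" ∧ 2 ≤ total_fruits.length) ∨
    (c = "G" ∧ 3 ≤ total_fruits.length) ∨ (c = "J" ∧ 4 ≤ total_fruits.length) ∨
    (c = "M" ∧ 5 ≤ total_fruits.length)
instance (garden : List (List String)) (total_fruits : List Int) : Decidable (Pre_autumn garden total_fruits) := by unfold Pre_autumn; infer_instance

def pvWitness_autumn : List (List String) × List Int :=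
  ([["F", "-", "M"], ["W", "W"]], [1, 2, 3, 4, 5])

def Spec_autumn (garden : List (List String)) (total_fruits : List Int) (out : List Int × List Int) : Prop := out = autumn_alt garden total_fruits
instance (garden : List (List String)) (total_fruits : List Int) (out : List Int × List Int) : Decidable (Spec_autumn garden total_fruits out) := by unfold Spec_autumn; infer_instance

-- ===== CLAIM (what is proved, stated in full; the proofs are below) =====
def Claim_equal_autumn : Prop := ∀ (garden : List (List String)) (total_fruits : List Int), Dom_autumn garden total_fruits → Pre_autumn garden total_fruits → Spec_autumn garden total_fruits (autumn garden total_fruits)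

-- ===== LEMMAS AND PROOFS =====

-- B's enumerate-fold, rephrased with a running Nat index
def distAux (t : List Int) (i : Nat) (ks : List Int) : List Int :=
  match ks with
  | [] => t
  | k :: r => distAux (if k ≠ 0 then addAt t i k else t) (i + 1) r

theorem enum_foldl_eq_distAux (ks : List Int) (n : Nat) (t : List Int) :
    (PySem.List.enumerate ks (n : Int)).foldl
      (fun t p => if p.2 ≠ 0 then addAt t p.1.toNat p.2 else t) t = distAux t n ks := by
  induction ks generalizing n t with
  | nil => rfl
  | cons k r ih =>
      rw [PySem.List.enumerate_cons, List.foldl_cons]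
      have h1 : ((n : Int) + 1) = ((n + 1 : Nat) : Int) := by push_cast; ring
      rw [h1, ih]
      simp [distAux]

theorem addAt_addAt_same (t : List Int) (i : Nat) (a b : Int) :
    addAt (addAt t i a) i b = addAt t i (a + b) := by
  unfold addAt
  rcases Nat.lt_or_ge i t.length with h | h
  · simp [List.getD_eq_getElem?_getD, List.set_set, h]
    ring_nf
  · simp [List.set_eq_of_length_le (by simpa using h)]

theorem addAt_comm (t : List Int) (i j : Nat) (a b : Int) (hij : i ≠ j) :
    addAt (addAt t i a) j b = addAt (addAt t j b) i a := by
  simp only [addAt, List.getD_eq_getElem?_getD, List.getElem?_set_ne hij,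
    List.getElem?_set_ne hij.symm]
  exact List.set_comm _ _ hij

-- bumping one entry of the tally list = one extra addAt before distributing
theorem distAux_bump (p : List Int) (k : Int) (hk : 0 ≤ k) (s : List Int) :
    ∀ (n : Nat) (t : List Int),
      distAux (addAt t (n + p.length) 1) n (p ++ k :: s)
        = distAux t n (p ++ (k + 1) :: s) := by
  induction p with
  | nil =>
      intro n t
      simp only [List.nil_append, List.length_nil, Nat.add_zero, distAux]
      have hk1 : k + 1 ≠ 0 := by omega
      by_cases h : k = 0
      · subst h; simp
      · simp only [ne_eq, h, not_false_eq_true, if_pos, hk1, addAt_addAt_same]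
        rw [Int.add_comm]
  | cons q qs ih =>
      intro n t
      simp only [List.cons_append, distAux, List.length_cons]
      have harr : n + (qs.length + 1) = (n + 1) + qs.length := by omega
      rw [harr]
      by_cases hq : q = 0
      · simp only [hq, ne_eq, not_true_eq_false, if_false, ih]
      · have hcm : addAt (addAt t ((n + 1) + qs.length) 1) n q
            = addAt (addAt t n q) ((n + 1) + qs.length) 1 :=
          addAt_comm _ _ _ _ _ (by omega)
        simp only [ne_eq, hq, not_false_eq_true, if_true, hcm, ih]

-- counts of the flattened cell list, as B computes them
def countsOf (cells : List String) : List Int :=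
  LIST_OF_FRUITS.map (fun f => (PySem.List.count cells f : Int))

theorem count_cons_self_int (x : String) (l : List String) :
    (PySem.List.count (x :: l) x : Int) = (PySem.List.count l x : Int) + 1 := by
  simp [PySem.List.count_eq]

theorem count_cons_ne (x v : String) (l : List String) (h : x ≠ v) :
    PySem.List.count (x :: l) v = PySem.List.count l v := by
  simp [PySem.List.count_eq, h]

theorem distAux_zeros (a b c d e : Int) :
    distAux [0, 0, 0, 0, 0] 0 [a, b, c, d, e] = [a, b, c, d, e] := by
  simp only [distAux, addAt]
  split_ifs <;> simp_all

-- the heart: A's per-cell fold from (t, h) distributes B's counts onto both components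
theorem foldl_stepA_eq (cells : List String) :
    ∀ (t h : List Int),
      cells.foldl stepA (t, h) = (distAux t 0 (countsOf cells), distAux h 0 (countsOf cells)) := by
  induction cells with
  | nil =>
      intro t h
      simp [countsOf, LIST_OF_FRUITS, PySem.List.count_eq, distAux]
  | cons c rest ih =>
      intro t h
      rw [List.foldl_cons]
      have expand : ∀ l : List String, countsOf l =
          [(PySem.List.count l "F" : Int), (PySem.List.count l "W" : Int),
           (PySem.List.count l "G" : Int), (PySem.List.count l "J" : Int),
           (PySem.List.count l "M" : Int)] := fun l => rfl
      by_cases hF : c = "F"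
      · subst hF
        have hidx : List.idxOf? "F" LIST_OF_FRUITS = some 0 := by decide
        have hs : stepA (t, h) "F" = (addAt t 0 1, addAt h 0 1) := by
          simp [stepA, PySem.List.index?_eq_idxOf?, hidx]
        rw [hs, ih]
        rw [expand ("F" :: rest), expand rest]
        rw [count_cons_self_int,
          count_cons_ne "F" "W" rest (by decide), count_cons_ne "F" "G" rest (by decide),
          count_cons_ne "F" "J" rest (by decide), count_cons_ne "F" "M" rest (by decide)]
        have hb := fun t => distAux_bump [] (PySem.List.count rest "F" : Int) (by positivity)
          [(PySem.List.count rest "W" : Int), (PySem.List.count rest "G" : Int),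
           (PySem.List.count rest "J" : Int), (PySem.List.count rest "M" : Int)] 0 t
        simp only [List.nil_append, List.length_nil, Nat.add_zero] at hb
        rw [hb t, hb h]
      · by_cases hW : c = "W"
        · subst hW
          have hidx : List.idxOf? "W" LIST_OF_FRUITS = some 1 := by decide
          have hs : stepA (t, h) "W" = (addAt t 1 1, addAt h 1 1) := by
            simp [stepA, PySem.List.index?_eq_idxOf?, hidx]
          rw [hs, ih]
          rw [expand ("W" :: rest), expand rest]
          rw [count_cons_self_int,
            count_cons_ne "W" "F" rest (by decide), count_cons_ne "W" "G" rest (by decide),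
            count_cons_ne "W" "J" rest (by decide), count_cons_ne "W" "M" rest (by decide)]
          have hb := fun t => distAux_bump [(PySem.List.count rest "F" : Int)]
            (PySem.List.count rest "W" : Int) (by positivity)
            [(PySem.List.count rest "G" : Int), (PySem.List.count rest "J" : Int),
             (PySem.List.count rest "M" : Int)] 0 t
          simp only [List.cons_append, List.nil_append, List.length_cons, List.length_nil,
            Nat.zero_add] at hb
          rw [hb t, hb h]
        · by_cases hG : c = "G"
          · subst hG
            have hidx : List.idxOf? "G" LIST_OF_FRUITS = some 2 := by decide
            have hs : stepA (t, h) "G" = (addAt t 2 1, addAt h 2 1) := by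
              simp [stepA, PySem.List.index?_eq_idxOf?, hidx]
            rw [hs, ih]
            rw [expand ("G" :: rest), expand rest]
            rw [count_cons_self_int,
              count_cons_ne "G" "F" rest (by decide), count_cons_ne "G" "W" rest (by decide),
              count_cons_ne "G" "J" rest (by decide), count_cons_ne "G" "M" rest (by decide)]
            have hb := fun t => distAux_bump
              [(PySem.List.count rest "F" : Int), (PySem.List.count rest "W" : Int)]
              (PySem.List.count rest "G" : Int) (by positivity)
              [(PySem.List.count rest "J" : Int), (PySem.List.count rest "M" : Int)] 0 t
            simp only [List.cons_append, List.nil_append, List.length_cons, List.length_nil,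
              Nat.zero_add] at hb
            rw [hb t, hb h]
          · by_cases hJ : c = "J"
            · subst hJ
              have hidx : List.idxOf? "J" LIST_OF_FRUITS = some 3 := by decide
              have hs : stepA (t, h) "J" = (addAt t 3 1, addAt h 3 1) := by
                simp [stepA, PySem.List.index?_eq_idxOf?, hidx]
              rw [hs, ih]
              rw [expand ("J" :: rest), expand rest]
              rw [count_cons_self_int,
                count_cons_ne "J" "F" rest (by decide), count_cons_ne "J" "W" rest (by decide),
                count_cons_ne "J" "G" rest (by decide), count_cons_ne "J" "M" rest (by decide)]
              have hb := fun t => distAux_bump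
                [(PySem.List.count rest "F" : Int), (PySem.List.count rest "W" : Int),
                 (PySem.List.count rest "G" : Int)]
                (PySem.List.count rest "J" : Int) (by positivity)
                [(PySem.List.count rest "M" : Int)] 0 t
              simp only [List.cons_append, List.nil_append, List.length_cons, List.length_nil,
                Nat.zero_add] at hb
              rw [hb t, hb h]
            · by_cases hM : c = "M"
              · subst hM
                have hidx : List.idxOf? "M" LIST_OF_FRUITS = some 4 := by decide
                have hs : stepA (t, h) "M" = (addAt t 4 1, addAt h 4 1) := by
                  simp [stepA, PySem.List.index?_eq_idxOf?, hidx]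
                rw [hs, ih]
                rw [expand ("M" :: rest), expand rest]
                rw [count_cons_self_int,
                  count_cons_ne "M" "F" rest (by decide), count_cons_ne "M" "W" rest (by decide),
                  count_cons_ne "M" "G" rest (by decide), count_cons_ne "M" "J" rest (by decide)]
                have hb := fun t => distAux_bump
                  [(PySem.List.count rest "F" : Int), (PySem.List.count rest "W" : Int),
                   (PySem.List.count rest "G" : Int), (PySem.List.count rest "J" : Int)]
                  (PySem.List.count rest "M" : Int) (by positivity) [] 0 t
                simp only [List.cons_append, List.nil_append, List.length_cons, List.length_nil,
                  Nat.zero_add] at hb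
                rw [hb t, hb h]
              · -- c is none of the five fruits: the cell contributes nothing on either side
                have hnm : c ∉ LIST_OF_FRUITS := by
                  simp [LIST_OF_FRUITS]
                  refine ⟨?_, ?_, ?_, ?_, ?_⟩ <;> intro hc <;>
                    first | exact hF hc | exact hW hc | exact hG hc | exact hJ hc | exact hM hc
                have hidx : PySem.List.index? LIST_OF_FRUITS c = none :=
                  (PySem.List.index?_eq_none_iff _ _).mpr hnm
                have hs : stepA (t, h) c = (t, h) := by
                  unfold stepA
                  rw [hidx]
                  split <;> rfl
                have hcnt : countsOf (c :: rest) = countsOf rest := by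
                  rw [expand (c :: rest), expand rest,
                    count_cons_ne c "F" rest (by exact hF), count_cons_ne c "W" rest hW,
                    count_cons_ne c "G" rest hG, count_cons_ne c "J" rest hJ,
                    count_cons_ne c "M" rest hM]
                rw [hs, ih, hcnt]

-- ===== VERDICT (by name: the statement is the Claim_ definition above) =====
theorem autumn_spec : Claim_equal_autumn := by
  intro garden total_fruits _ _
  unfold Spec_autumn autumn autumn_alt
  have hflat : garden.foldl (fun st row => row.foldl stepA st) (total_fruits, [0, 0, 0, 0, 0])
      = (garden.flatMap (fun row => row)).foldl stepA (total_fruits, [0, 0, 0, 0, 0]) := by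
    rw [List.flatMap_def, List.map_id', List.foldl_flatten]
  rw [hflat, foldl_stepA_eq]
  have henum := enum_foldl_eq_distAux
    (countsOf (garden.flatMap (fun row => row))) 0 total_fruits
  simp only [Nat.cast_zero] at henum
  have hcounts : (LIST_OF_FRUITS.map
      (fun f => (PySem.List.count (garden.flatMap (fun row => row)) f : Int)))
      = countsOf (garden.flatMap (fun row => row)) := rfl
  simp only [hcounts, henum]
  have hz : distAux [0, 0, 0, 0, 0] 0 (countsOf (garden.flatMap (fun row => row)))
      = countsOf (garden.flatMap (fun row => row)) := by
    exact distAux_zeros _ _ _ _ _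
  rw [hz]
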